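-- pv_equiv track=rewrite | github.com/Konfused0/Anveshak_E-SW_App | Question 2, B.4/can_frames_error_detection_ED25B041.py | frame_bytes_to_bits
-- ===== SOURCE A (Python) =====
-- def hex_to_bits(hex_string):
--     bits=[]
--     for h in hex_string.strip().split():
--         byte=int(h,16)
--         for i in range(7,-1,-1):
--             bits.append((byte >> i) & 1)
--
--     return bits
--
-- def frame_bytes_to_bits(id_hex, dlc, data_hex):
--     bits = [0]
--
--     id_val = int(id_hex, 16)
--     for i in range(10, -1, -1):
--         bits.append((id_val >> i) & 1)
--
--     bits.extend([0, 0, 0])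
--     dlc_val = dlc & 0xF
--     for i in range(3, -1, -1):
--         bits.append((dlc_val >> i) & 1)
--
--     bits.extend(hex_to_bits(data_hex))
--     return bits
-- ===== SOURCE B (Python) =====
-- def frame_bytes_to_bits(id_hex, dlc, data_hex):
--     s = ('0'
--          + format(int(id_hex, 16) % 0x800, '011b')
--          + '000'
--          + format(dlc % 16, '04b')
--          + ''.join(format(int(h, 16) % 0x100, '08b') for h in data_hex.strip().split()))
--     return [int(c) for c in s]
-- ===== Notes on version B (the rewrite author's own statement) =====
-- stated objective: idiomatic
-- what changed: Replaces every shift-and-mask bit loop by fixed-width binary string formatting (format(v % 2**w, '0{w}b')) concatenated into one bit string that is then mapped to ints; bits come from division-based decimal-to-binary rendering of whole masked fields, not from per-position shifts.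
-- outside the precondition, e.g. on frame_bytes_to_bits('xyz', 1, 'FF'): A raises ValueError, B raises ValueError; on frame_bytes_to_bits('1A', 1, 'FF qq'): A raises ValueError, B raises ValueError
import Mathlib
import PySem

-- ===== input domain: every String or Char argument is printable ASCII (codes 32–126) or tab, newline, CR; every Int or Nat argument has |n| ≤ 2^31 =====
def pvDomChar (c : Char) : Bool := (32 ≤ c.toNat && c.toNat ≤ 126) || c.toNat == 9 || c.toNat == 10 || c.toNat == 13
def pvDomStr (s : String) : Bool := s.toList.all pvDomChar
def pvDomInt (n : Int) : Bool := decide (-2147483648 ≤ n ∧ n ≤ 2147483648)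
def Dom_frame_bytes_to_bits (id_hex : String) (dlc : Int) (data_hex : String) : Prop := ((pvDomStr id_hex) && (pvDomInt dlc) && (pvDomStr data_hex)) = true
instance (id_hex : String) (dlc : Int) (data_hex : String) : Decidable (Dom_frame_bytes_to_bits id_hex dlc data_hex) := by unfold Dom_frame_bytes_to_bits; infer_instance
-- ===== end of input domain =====

-- B replaces A's per-position shift-and-mask bit loops by whole-field binary string
-- formatting (an idiomatic rewrite, no speed claim); equivalence is about the return value.

-- ===== PORT A =====
-- int(h, 16) is PySem.Int.ofStrBase? h 16; on Pre_ it is always `some`, the `.getD 0`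
-- default is never reached (Python raises ValueError exactly where it is `none`).
def hex_to_bits (hex_string : String) : List Int :=
  (PySem.Str.split₀ (PySem.Str.strip hex_string)).foldl
    (fun bits h =>
      let byte := (PySem.Int.ofStrBase? h 16).getD 0
      (PySem.List.pyRange 7 (-1) (-1)).foldl
        (fun bits i => bits ++ [PySem.Int.band (byte >>> i.toNat) 1]) bits)
    []

def frame_bytes_to_bits (id_hex : String) (dlc : Int) (data_hex : String) : List Int :=
  let bits : List Int := [0]
  let id_val := (PySem.Int.ofStrBase? id_hex 16).getD 0
  let bits := (PySem.List.pyRange 10 (-1) (-1)).foldl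
    (fun bits i => bits ++ [PySem.Int.band (id_val >>> i.toNat) 1]) bits
  let bits := bits ++ [0, 0, 0]
  let dlc_val := PySem.Int.band dlc 15
  let bits := (PySem.List.pyRange 3 (-1) (-1)).foldl
    (fun bits i => bits ++ [PySem.Int.band (dlc_val >>> i.toNat) 1]) bits
  bits ++ hex_to_bits data_hex

-- ===== PORT B =====
-- format(n, '0{w}b') for n ≥ 0: binary digits of n (via repeated division), left-padded
-- with '0' to width w.  All arguments here are `v % 2^w ≥ 0`.
def pvNatBinAux (n : Nat) (acc : List Char) : List Char :=
  if h : n = 0 then acc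
  else pvNatBinAux (n / 2) ((if n % 2 = 1 then '1' else '0') :: acc)
termination_by n
decreasing_by exact Nat.div_lt_self (Nat.pos_of_ne_zero h) one_lt_two

def pvNatBin (n : Nat) : List Char := if n = 0 then ['0'] else pvNatBinAux n []

def pvFmtBin (w : Nat) (n : Nat) : List Char :=
  List.replicate (w - (pvNatBin n).length) '0' ++ pvNatBin n

-- int(c) on the digit characters of s is c.toNat - 48 (s contains only '0'/'1').
def frame_bytes_to_bits_alt (id_hex : String) (dlc : Int) (data_hex : String) : List Int :=
  let s : List Char :=
    '0' :: pvFmtBin 11 (PySem.Int.mod ((PySem.Int.ofStrBase? id_hex 16).getD 0) 2048).toNat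
      ++ ('0' :: '0' :: '0' :: pvFmtBin 4 (PySem.Int.mod dlc 16).toNat)
      ++ (PySem.Str.split₀ (PySem.Str.strip data_hex)).flatMap
           (fun h => pvFmtBin 8 (PySem.Int.mod ((PySem.Int.ofStrBase? h 16).getD 0) 256).toNat)
  s.map (fun c => (c.toNat : Int) - 48)

-- ===== PRECONDITION & SPEC =====
-- Pre_ = exactly where Python A returns: id_hex and every whitespace-separated token of
-- data_hex must parse as base-16 integers (otherwise int(·, 16) raises ValueError).
def Pre_frame_bytes_to_bits (id_hex : String) (dlc : Int) (data_hex : String) : Prop :=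
  (PySem.Int.ofStrBase? id_hex 16).isSome = true ∧
  ∀ h ∈ PySem.Str.split₀ (PySem.Str.strip data_hex), (PySem.Int.ofStrBase? h 16).isSome = true
instance (id_hex : String) (dlc : Int) (data_hex : String) : Decidable (Pre_frame_bytes_to_bits id_hex dlc data_hex) := by
  unfold Pre_frame_bytes_to_bits; infer_instance

def pvWitness_frame_bytes_to_bits : String × Int × String := ("1A", 8, "FF 00")

def Spec_frame_bytes_to_bits (id_hex : String) (dlc : Int) (data_hex : String) (out : List Int) : Prop := out = frame_bytes_to_bits_alt id_hex dlc data_hex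
instance (id_hex : String) (dlc : Int) (data_hex : String) (out : List Int) : Decidable (Spec_frame_bytes_to_bits id_hex dlc data_hex out) := by unfold Spec_frame_bytes_to_bits; infer_instance

-- ===== CLAIM (what is proved, stated in full; the proofs are below) =====
def Claim_equal_frame_bytes_to_bits : Prop := ∀ (id_hex : String) (dlc : Int) (data_hex : String), Dom_frame_bytes_to_bits id_hex dlc data_hex → Pre_frame_bytes_to_bits id_hex dlc data_hex → Spec_frame_bytes_to_bits id_hex dlc data_hex (frame_bytes_to_bits id_hex dlc data_hex)

-- ===== LEMMAS AND PROOFS =====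

-- The low w bits of an Int, most significant first (Int ediv/emod version, then Nat).
def pvBitsI : Nat → Int → List Int
  | 0, _ => []
  | w + 1, x => pvBitsI w (x / 2) ++ [x % 2]

def pvBitsN : Nat → Nat → List Int
  | 0, _ => []
  | w + 1, m => pvBitsN w (m / 2) ++ [((m % 2 : Nat) : Int)]

theorem pv_shift_succ (x : Int) (j : Nat) : x >>> (j + 1) = (x / 2) >>> j := by
  rw [Int.shiftRight_eq_div_pow, Int.shiftRight_eq_div_pow, pow_succ']
  push_cast
  rw [Int.ediv_ediv_of_nonneg (by norm_num : (0:Int) ≤ 2)]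

theorem pv_band_one (x : Int) : PySem.Int.band x 1 = x % 2 := by
  rw [PySem.Int.band_one, PySem.Int.mod_eq_emod_of_pos (by norm_num)]

theorem pv_bitmap (w : Nat) : ∀ x : Int,
    (List.range w).map (fun k => PySem.Int.band (x >>> (w - 1 - k)) 1) = pvBitsI w x := by
  induction w with
  | zero => intro x; simp [pvBitsI]
  | succ w ih =>
    intro x
    rw [List.range_succ, List.map_append]
    have hfront : (List.range w).map (fun k => PySem.Int.band (x >>> (w + 1 - 1 - k)) 1)
        = (List.range w).map (fun k => PySem.Int.band ((x / 2) >>> (w - 1 - k)) 1) := by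
      apply List.map_congr_left
      intro k hk
      rw [List.mem_range] at hk
      have h1 : w + 1 - 1 - k = (w - 1 - k) + 1 := by omega
      rw [h1, pv_shift_succ]
    rw [hfront, ih (x / 2)]
    simp [pvBitsI, pv_band_one]

theorem pv_bitsI_eq_bitsN (w : Nat) : ∀ x : Int,
    pvBitsI w x = pvBitsN w ((x % ((2:Int) ^ w)).toNat) := by
  induction w with
  | zero => intro x; simp [pvBitsI, pvBitsN]
  | succ w ih =>
    intro x
    have hp : (2:Int) ^ (w + 1) = 2 ^ w * 2 := by ring
    have hr0 : 0 ≤ x % 2 ^ (w + 1) := Int.emod_nonneg x (by positivity)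
    have hr1 : x % 2 ^ (w + 1) < 2 ^ w * 2 := by
      have := Int.emod_lt_of_pos x (b := 2 ^ (w + 1)) (by positivity)
      omega
    have hdm := Int.mul_ediv_add_emod x (2 ^ (w + 1))
    have hx' : x = x % 2 ^ (w + 1) + (2 ^ w * (x / 2 ^ (w + 1))) * 2 := by
      linear_combination (-1 : Int) * hdm + (x / 2 ^ (w + 1)) * hp
    have h2 : (x % 2 ^ (w + 1) + (2 ^ w * (x / 2 ^ (w + 1))) * 2) / 2
        = x % 2 ^ (w + 1) / 2 + 2 ^ w * (x / 2 ^ (w + 1)) :=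
      Int.add_mul_ediv_right _ _ (by norm_num)
    have h3 : x / 2 = x % 2 ^ (w + 1) / 2 + 2 ^ w * (x / 2 ^ (w + 1)) := by
      rw [← h2, ← hx']
    have hhalf : (x % 2 ^ (w + 1)) / 2 = (x / 2) % 2 ^ w := by
      rw [h3, Int.add_mul_emod_self_left]
      exact (Int.emod_eq_of_lt (by omega) (by omega)).symm
    have hmod2 : x % 2 = (x % 2 ^ (w + 1)) % 2 :=
      (Int.emod_emod_of_dvd x ⟨2 ^ w, by ring⟩).symm
    have hs0 : 0 ≤ (x / 2) % 2 ^ w := Int.emod_nonneg _ (by positivity)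
    rw [pvBitsI, pvBitsN, ih (x / 2)]
    congr 1
    · congr 1
      omega
    · have hv : x % 2 = (((x % 2 ^ (w + 1)).toNat % 2 : Nat) : Int) := by omega
      rw [hv]

theorem pv_bitsN_zero (w : Nat) : pvBitsN w 0 = List.replicate w (0 : Int) := by
  induction w with
  | zero => simp [pvBitsN]
  | succ w ih => rw [pvBitsN]; simp [ih, List.replicate_succ']

theorem pv_aux_zero (acc : List Char) : pvNatBinAux 0 acc = acc := by
  rw [pvNatBinAux]
  simp

theorem pv_aux_step (n : Nat) (acc : List Char) (h : n ≠ 0) :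
    pvNatBinAux n acc = pvNatBinAux (n / 2) ((if n % 2 = 1 then '1' else '0') :: acc) := by
  rw [pvNatBinAux]
  simp [h]

theorem pv_aux_append (n : Nat) : ∀ acc : List Char, pvNatBinAux n acc = pvNatBinAux n [] ++ acc := by
  induction n using Nat.strong_induction_on with
  | _ n ih =>
    intro acc
    by_cases h : n = 0
    · subst h; rw [pv_aux_zero, pv_aux_zero]; simp
    · have hlt : n / 2 < n := Nat.div_lt_self (Nat.pos_of_ne_zero h) one_lt_two
      rw [pv_aux_step n acc h, pv_aux_step n [] h,
          ih _ hlt ((if n % 2 = 1 then '1' else '0') :: acc),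
          ih _ hlt [(if n % 2 = 1 then '1' else '0')]]
      simp

theorem pv_charVal_digit (b : Nat) (hb : b < 2) :
    ((if b = 1 then '1' else '0').toNat : Int) - 48 = (b : Int) := by
  interval_cases b <;> simp

theorem pv_key (w : Nat) : ∀ m : Nat, m < 2 ^ w → 0 < w →
    pvBitsN w m = List.replicate (w - (pvNatBin m).length) (0 : Int)
      ++ (pvNatBin m).map (fun c => (c.toNat : Int) - 48) := by
  induction w with
  | zero => intro m _ h; omega
  | succ w ih =>
    intro m hm _
    have hval : ∀ n : Nat, n ≠ 0 → pvNatBin n = pvNatBinAux n [] := by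
      intro n hn; simp [pvNatBin, hn]
    by_cases h0 : m = 0
    · subst h0
      rw [pv_bitsN_zero]
      simp [pvNatBin, List.replicate_succ']
    · rw [pvBitsN]
      by_cases h1 : m / 2 = 0
      · -- m = 1
        have hm1 : m = 1 := by omega
        subst hm1
        rw [pv_bitsN_zero]
        have hone : pvNatBin 1 = ['1'] := by
          rw [hval 1 (by norm_num), pv_aux_step 1 [] (by norm_num)]
          norm_num [pv_aux_zero]
        simp [hone]
      · have hw : 0 < w := by
          by_contra hw
          have hweq : w = 0 := by omega
          subst hweq
          interval_cases m <;> omega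
        have hm2 : m / 2 < 2 ^ w := by
          have hp : 2 ^ (w + 1) = 2 ^ w * 2 := by ring
          omega
        have hrec : pvNatBin m = pvNatBin (m / 2) ++ [if m % 2 = 1 then '1' else '0'] := by
          rw [hval m h0, pv_aux_step m [] h0, pv_aux_append, hval (m / 2) h1]
        rw [ih (m / 2) hm2 hw, hrec]
        have hsub : w + 1 - ((pvNatBin (m / 2)).length + 1) = w - (pvNatBin (m / 2)).length := by
          omega
        simp only [List.length_append, List.length_singleton, hsub, List.map_append]
        rw [List.append_assoc]
        congr 1
        simp [pv_charVal_digit (m % 2) (Nat.mod_lt m (by norm_num))]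

-- the loop of A over one field of width w equals the formatted field of B
theorem pv_seg (x : Int) (w : Nat) (a : Int) (hw : 0 < w) (ha : a = (w : Int) - 1) (init : List Int) :
    (PySem.List.pyRange a (-1) (-1)).foldl
      (fun bits i => bits ++ [PySem.Int.band (x >>> i.toNat) 1]) init
    = init ++ (pvFmtBin w ((x % ((2:Int) ^ w)).toNat)).map (fun c => (c.toNat : Int) - 48) := by
  subst ha
  rw [PySem.List.foldl_append_singleton_eq_map]
  congr 1
  rw [PySem.List.pyRange_neg_one]
  have hn : (((w : Int) - 1) - (-1)).toNat = w := by omega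
  rw [hn, List.map_map]
  have hmap : (List.range w).map ((fun i => PySem.Int.band (x >>> i.toNat) 1) ∘ (fun k : Nat => (w : Int) - 1 - (k : Int)))
      = (List.range w).map (fun k => PySem.Int.band (x >>> (w - 1 - k)) 1) := by
    apply List.map_congr_left
    intro k hk
    rw [List.mem_range] at hk
    simp only [Function.comp_apply]
    have harg : ((w : Int) - 1 - (k : Int)).toNat = w - 1 - k := by omega
    rw [harg, Int.shiftRight_natCast_right]
  rw [hmap, pv_bitmap w x, pv_bitsI_eq_bitsN w x]
  have hbound : ((x % (2:Int) ^ w)).toNat < 2 ^ w := by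
    have h0 : 0 ≤ x % (2:Int) ^ w := Int.emod_nonneg x (by positivity)
    have h1 : x % (2:Int) ^ w < 2 ^ w := Int.emod_lt_of_pos x (by positivity)
    have hc : ((2:Int) ^ w) = ((2 ^ w : Nat) : Int) := by push_cast; ring
    omega
  rw [pv_key w _ hbound hw]
  simp [pvFmtBin, List.map_replicate]

theorem pv_band15 (x : Int) : PySem.Int.band x 15 = x % 16 := by
  have h15 : (15:Int).toNat = 15 := rfl
  by_cases hx : 0 ≤ x
  · show (if 0 ≤ x then if (0:Int) ≤ 15 then _ else _ else _) = x % 16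
    rw [if_pos hx, if_pos (by norm_num : (0:Int) ≤ 15), h15]
    have h := Nat.and_two_pow_sub_one_eq_mod x.toNat 4
    norm_num at h
    rw [h]
    omega
  · show (if 0 ≤ x then _ else if (0:Int) ≤ 15 then _ else _) = x % 16
    rw [if_neg hx, if_pos (by norm_num : (0:Int) ≤ 15), h15]
    have h := Nat.and_two_pow_sub_one_eq_mod (-x - 1).toNat 4
    simp only [Nat.reducePow, Nat.reduceSub] at h
    rw [Nat.and_comm 15 (-x - 1).toNat, h]
    omega

theorem pv_hexlem (l : List String) : ∀ init : List Int,
    l.foldl (fun bits h =>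
        (PySem.List.pyRange 7 (-1) (-1)).foldl
          (fun bits i => bits ++ [PySem.Int.band (((PySem.Int.ofStrBase? h 16).getD 0) >>> i.toNat) 1]) bits) init
    = init ++ l.flatMap (fun h =>
        (pvFmtBin 8 ((((PySem.Int.ofStrBase? h 16).getD 0) % ((2:Int) ^ 8)).toNat)).map
          (fun c => (c.toNat : Int) - 48)) := by
  induction l with
  | nil => intro init; simp
  | cons h t ih =>
    intro init
    rw [List.foldl_cons, List.flatMap_cons,
        pv_seg ((PySem.Int.ofStrBase? h 16).getD 0) 8 7 (by norm_num) (by norm_num) init, ih]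
    simp [List.append_assoc]

theorem pv_main (id_hex : String) (dlc : Int) (data_hex : String) :
    frame_bytes_to_bits id_hex dlc data_hex = frame_bytes_to_bits_alt id_hex dlc data_hex := by
  simp only [frame_bytes_to_bits, frame_bytes_to_bits_alt, hex_to_bits]
  rw [pv_seg _ 11 10 (by norm_num) (by norm_num),
      pv_seg _ 4 3 (by norm_num) (by norm_num),
      pv_hexlem]
  have e1 : PySem.Int.mod ((PySem.Int.ofStrBase? id_hex 16).getD 0) 2048
      = ((PySem.Int.ofStrBase? id_hex 16).getD 0) % ((2:Int) ^ 11) := by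
    rw [PySem.Int.mod_eq_emod_of_pos (by norm_num)]; norm_num
  have e2 : PySem.Int.mod dlc 16 = (PySem.Int.band dlc 15) % ((2:Int) ^ 4) := by
    rw [PySem.Int.mod_eq_emod_of_pos (by norm_num), pv_band15]
    have hc : ((2:Int) ^ 4) = 16 := by norm_num
    rw [hc, Int.emod_emod_of_dvd dlc dvd_rfl]
  have e3 : ∀ h : String, PySem.Int.mod ((PySem.Int.ofStrBase? h 16).getD 0) 256
      = ((PySem.Int.ofStrBase? h 16).getD 0) % ((2:Int) ^ 8) := by
    intro h; rw [PySem.Int.mod_eq_emod_of_pos (by norm_num)]; norm_num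
  simp only [e1, e2, e3, List.map_cons, List.map_append, List.map_flatMap]
  norm_num [List.append_assoc, show (('0'.toNat : Int) - 48) = 0 from by decide]

-- ===== VERDICT (by name: the statement is the Claim_ definition above) =====
theorem frame_bytes_to_bits_spec : Claim_equal_frame_bytes_to_bits := by
  intro id_hex dlc data_hex _ _
  unfold Spec_frame_bytes_to_bits
  exact pv_main id_hex dlc data_hex
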